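-- pv_equiv track=rewrite | github.com/abhichhn93/bhoolamind | modules/emotion_tagger.py | _calculate_intensity
-- ===== SOURCE A (Python) =====
-- def _calculate_intensity(text: str) -> int:
--     """Calculate emotional intensity from text patterns"""
--     text_lower = text.lower()
--     intensity = 1
--
--     # High intensity indicators
--     high_markers = [
--         "!!!", "fucking", "amazing", "brilliant", "hilarious",
--         "super", "extremely", "totally", "absolutely", "bahut",
--         "bohat", "ekdum", "bilkul"
--     ]
--
--     # Medium intensity indicators
--     medium_markers = [
--         "!!", "very", "quite", "really", "pretty", "kaafi", "thoda"
--     ]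
--
--     # Count intensity markers
--     high_count = sum(1 for marker in high_markers if marker in text_lower)
--     medium_count = sum(1 for marker in medium_markers if marker in text_lower)
--
--     if high_count >= 2 or "!!!" in text:
--         intensity = 3
--     elif high_count >= 1 or medium_count >= 2:
--         intensity = 2
--
--     # Check for ALL CAPS (indicates high intensity)
--     caps_words = [word for word in text.split() if word.isupper() and len(word) > 2]
--     if len(caps_words) >= 2:
--         intensity = max(intensity, 3)
--     elif len(caps_words) >= 1:
--         intensity = max(intensity, 2)
--
--     return intensity
-- ===== SOURCE B (Python) =====
-- def _calculate_intensity(text: str) -> int: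
--     """Single left-to-right scan over the lowered text collecting which markers start at
--     each position into a set, then a descending early-return cascade over the tiers."""
--     tl = text.lower()
--     HIGH = ["!!!", "fucking", "amazing", "brilliant", "hilarious",
--             "super", "extremely", "totally", "absolutely", "bahut",
--             "bohat", "ekdum", "bilkul"]
--     MEDIUM = ["!!", "very", "quite", "really", "pretty", "kaafi", "thoda"]
--     markers = HIGH + MEDIUM
--     found = set()
--     i = 0
--     while i < len(tl):
--         for m in markers:
--             if m not in found and tl.startswith(m, i):
--                 found.add(m)
--         i += 1
--     high = sum(1 for m in HIGH if m in found)
--     med = sum(1 for m in MEDIUM if m in found)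
--     caps = sum(1 for w in text.split() if w.isupper() and len(w) > 2)
--     if high >= 2 or caps >= 2 or "!!!" in text:
--         return 3
--     if high >= 1 or med >= 2 or caps >= 1:
--         return 2
--     return 1
-- ===== Notes on version B (the rewrite author's own statement) =====
-- stated objective: alternative
-- what changed: Instead of A's per-marker containment tests plus sequential intensity mutation with max() patches, B makes one left-to-right scan over the positions of the lowered text, at each position recording into a set which markers start there, then derives the counts from that set and decides the result with a descending early-return cascade (3, then 2, then 1); it trades interpreter speed for the explicit single-scan structure.
import Mathlib
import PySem

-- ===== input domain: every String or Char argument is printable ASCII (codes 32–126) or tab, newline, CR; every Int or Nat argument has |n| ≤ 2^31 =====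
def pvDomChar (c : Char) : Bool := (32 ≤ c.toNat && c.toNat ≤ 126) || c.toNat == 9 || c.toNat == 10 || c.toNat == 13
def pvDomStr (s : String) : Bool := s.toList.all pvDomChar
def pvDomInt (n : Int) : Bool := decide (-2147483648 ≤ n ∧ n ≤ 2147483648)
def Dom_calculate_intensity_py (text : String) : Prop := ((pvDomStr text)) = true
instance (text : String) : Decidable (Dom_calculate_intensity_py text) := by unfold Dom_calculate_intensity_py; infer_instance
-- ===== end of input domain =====

-- B replaces A's per-marker containment tests and sequential intensity mutation by a single
-- left-to-right scan over the lowered text collecting the markers found into a set, followed by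
-- a descending early-return cascade (alternative decomposition; same asymptotic cost).

-- ===== PORT A =====
-- word.isupper(): at least one cased char and no lowercase one; exact on the ASCII domain (where cased = alphabetic)
def pyStrIsupper (w : String) : Bool :=
  w.toList.any PySem.Chars.isupper && !(w.toList.any PySem.Chars.islower)

def highMarkersA : List String :=
  ["!!!", "fucking", "amazing", "brilliant", "hilarious",
   "super", "extremely", "totally", "absolutely", "bahut",
   "bohat", "ekdum", "bilkul"]

def mediumMarkersA : List String :=
  ["!!", "very", "quite", "really", "pretty", "kaafi", "thoda"]

def calculate_intensity_py (text : String) : Int :=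
  let text_lower := PySem.Str.lower text
  let intensity : Int := 1
  let high_count : Int :=
    highMarkersA.foldl (fun acc marker => if PySem.Str.isIn marker text_lower then acc + 1 else acc) 0
  let medium_count : Int :=
    mediumMarkersA.foldl (fun acc marker => if PySem.Str.isIn marker text_lower then acc + 1 else acc) 0
  let intensity :=
    if 2 ≤ high_count ∨ PySem.Str.isIn "!!!" text then (3 : Int)
    else if 1 ≤ high_count ∨ 2 ≤ medium_count then (2 : Int)
    else intensity
  let caps_words :=
    (PySem.Str.split₀ text).filter (fun word => pyStrIsupper word && decide (2 < PySem.Str.len word))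
  let intensity :=
    if 2 ≤ caps_words.length then max intensity 3
    else if 1 ≤ caps_words.length then max intensity 2
    else intensity
  intensity

-- ===== PORT B =====
def highMarkersB : List String :=
  ["!!!", "fucking", "amazing", "brilliant", "hilarious",
   "super", "extremely", "totally", "absolutely", "bahut",
   "bohat", "ekdum", "bilkul"]

def mediumMarkersB : List String :=
  ["!!", "very", "quite", "really", "pretty", "kaafi", "thoda"]

def allMarkersB : List String := highMarkersB ++ mediumMarkersB

-- Source B's index loop 'while i < len(tl): … tl.startswith(m, i)' as structural recursion on the
-- remaining suffix tl[i:]; startswith(m, i) is exactly the prefix test m.toList <+: tl.drop i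
def scanMarkers (markers : List String) : List Char → PySem.Set String → PySem.Set String
  | [], found => found
  | c :: rest, found =>
      scanMarkers markers rest
        (markers.foldl
          (fun f m =>
            if !(PySem.Set.contains f m) && decide (m.toList <+: (c :: rest)) then PySem.Set.add f m
            else f)
          found)

def calculate_intensity_py_alt (text : String) : Int :=
  let tl := PySem.Str.lower text
  let found := scanMarkers allMarkersB tl.toList PySem.Set.empty
  let high : Int := (highMarkersB.countP (fun m => PySem.Set.contains found m) : Nat)
  let med : Int := (mediumMarkersB.countP (fun m => PySem.Set.contains found m) : Nat)
  let caps : Int :=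
    ((PySem.Str.split₀ text).countP (fun w => pyStrIsupper w && decide (2 < PySem.Str.len w)) : Nat)
  if 2 ≤ high ∨ 2 ≤ caps ∨ PySem.Str.isIn "!!!" text then 3
  else if 1 ≤ high ∨ 2 ≤ med ∨ 1 ≤ caps then 2
  else 1

-- ===== PRECONDITION & SPEC =====
def Spec_calculate_intensity_py (text : String) (out : Int) : Prop := out = calculate_intensity_py_alt text
instance (text : String) (out : Int) : Decidable (Spec_calculate_intensity_py text out) := by unfold Spec_calculate_intensity_py; infer_instance

-- ===== CLAIM (what is proved, stated in full; the proofs are below) =====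
def Claim_equal_calculate_intensity_py : Prop := ∀ (text : String), Dom_calculate_intensity_py text → Spec_calculate_intensity_py text (calculate_intensity_py text)

-- ===== LEMMAS AND PROOFS =====
lemma foldl_count_eq_countP {α : Type} (p : α → Bool) (l : List α) (n : Int) :
    l.foldl (fun acc m => if p m then acc + 1 else acc) n = n + (l.countP p : Nat) := by
  induction l generalizing n with
  | nil => simp
  | cons a t ih =>
    simp only [List.foldl_cons, List.countP_cons, ih]
    by_cases h : p a = true
    · simp [h]; ring
    · simp [h]

-- membership after one position's pass over the marker list
lemma mem_scanStep (markers : List String) (s : List Char) (f : PySem.Set String) (x : String) :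
    x ∈ markers.foldl
        (fun f m =>
          if !(PySem.Set.contains f m) && decide (m.toList <+: s) then PySem.Set.add f m else f) f
      ↔ x ∈ f ∨ (x ∈ markers ∧ x.toList <+: s) := by
  induction markers generalizing f with
  | nil => simp
  | cons m ms ih =>
    simp only [List.foldl_cons, ih, List.mem_cons]
    by_cases hc : PySem.Set.contains f m = true
    · by_cases hp : m.toList <+: s
      · simp only [hc, hp]
        constructor
        · rintro (h | h)
          · exact Or.inl h
          · exact Or.inr ⟨Or.inr h.1, h.2⟩
        · rintro (h | ⟨(rfl | h), hq⟩)
          · exact Or.inl h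
          · exact Or.inl ((PySem.Set.contains_iff _ _).mp hc)
          · exact Or.inr ⟨h, hq⟩
      · simp only [hc, hp]
        constructor
        · rintro (h | h)
          · exact Or.inl h
          · exact Or.inr ⟨Or.inr h.1, h.2⟩
        · rintro (h | ⟨(rfl | h), hq⟩)
          · exact Or.inl h
          · exact absurd hq hp
          · exact Or.inr ⟨h, hq⟩
    · by_cases hp : m.toList <+: s
      · simp only [hc, hp, decide_true, Bool.not_false, Bool.and_self, if_pos, PySem.Set.mem_add]
        constructor
        · rintro ((h | rfl) | h)
          · exact Or.inl h
          · exact Or.inr ⟨Or.inl rfl, hp⟩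
          · exact Or.inr ⟨Or.inr h.1, h.2⟩
        · rintro (h | ⟨(rfl | h), hq⟩)
          · exact Or.inl (Or.inl h)
          · exact Or.inl (Or.inr rfl)
          · exact Or.inr ⟨h, hq⟩
      · simp only [hc, hp]
        constructor
        · rintro (h | h)
          · exact Or.inl h
          · exact Or.inr ⟨Or.inr h.1, h.2⟩
        · rintro (h | ⟨(rfl | h), hq⟩)
          · exact Or.inl h
          · exact absurd hq hp
          · exact Or.inr ⟨h, hq⟩

lemma mem_scanMarkers (markers : List String) (l : List Char) (f : PySem.Set String) (x : String) :
    x ∈ scanMarkers markers l f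
      ↔ x ∈ f ∨ (x ∈ markers ∧ ∃ j, j < l.length ∧ x.toList <+: l.drop j) := by
  induction l generalizing f with
  | nil => simp [scanMarkers]
  | cons c rest ih =>
    rw [scanMarkers, ih, mem_scanStep]
    constructor
    · rintro ((h | ⟨hm, hp⟩) | ⟨hm, j, hj, hp⟩)
      · exact Or.inl h
      · exact Or.inr ⟨hm, 0, by simp, hp⟩
      · exact Or.inr ⟨hm, j + 1, by simpa using hj, hp⟩
    · rintro (h | ⟨hm, j, hj, hp⟩)
      · exact Or.inl (Or.inl h)
      · cases j with
        | zero => exact Or.inl (Or.inr ⟨hm, hp⟩)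
        | succ j' => exact Or.inr ⟨hm, j', by simpa using hj, hp⟩

-- a nonempty pattern is an infix iff it is a prefix of some proper suffix
lemma contains_scan_eq_isIn (m : String) (tl : List Char)
    (hm : m ∈ allMarkersB) (hne : m.toList ≠ []) :
    PySem.Set.contains (scanMarkers allMarkersB tl PySem.Set.empty) m
      = PySem.Chars.isIn m.toList tl := by
  rw [Bool.eq_iff_iff, PySem.Set.contains_iff, mem_scanMarkers,
      ← PySem.Chars.exists_prefix_drop_iff_isIn]
  constructor
  · rintro (h | ⟨_, j, _, hp⟩)
    · simp [PySem.Set.empty] at h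
    · exact ⟨j, hp⟩
  · rintro ⟨j, hp⟩
    by_cases hj : j < tl.length
    · exact Or.inr ⟨hm, j, hj, hp⟩
    · exfalso
      rw [List.drop_eq_nil_of_le (by omega)] at hp
      exact hne (List.prefix_nil.mp hp)

-- ===== VERDICT (by name: the statement is the Claim_ definition above) =====
theorem calculate_intensity_py_spec : Claim_equal_calculate_intensity_py := by
  intro text _
  unfold Spec_calculate_intensity_py calculate_intensity_py calculate_intensity_py_alt
  have hcount : ∀ l : List String, (∀ m ∈ l, m ∈ allMarkersB ∧ m.toList ≠ []) →
      l.countP (fun m =>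
        PySem.Set.contains (scanMarkers allMarkersB (PySem.Str.lower text).toList PySem.Set.empty) m)
      = l.countP (fun m => PySem.Str.isIn m (PySem.Str.lower text)) := by
    intro l hl
    refine List.countP_congr (fun m hm => ?_)
    obtain ⟨h1, h2⟩ := hl m hm
    rw [contains_scan_eq_isIn m _ h1 h2]
    simp [PySem.Str.isIn]
  have hHigh := hcount highMarkersB (by decide)
  have hMed := hcount mediumMarkersB (by decide)
  have hHM : highMarkersA = highMarkersB := rfl
  have hMM : mediumMarkersA = mediumMarkersB := rfl
  simp only [foldl_count_eq_countP, zero_add, hHigh, hMed, hHM, hMM,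
    ← List.countP_eq_length_filter]
  by_cases hb : PySem.Str.isIn "!!!" text = true
  · simp only [hb, or_true]
    split_ifs <;> omega
  · rw [Bool.not_eq_true] at hb
    simp only [hb, Bool.false_eq_true, or_false]
    split_ifs <;> omega
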